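-- pv_equiv track=rewrite | github.com/Jacke/doradura | refactor_main.py | find_command_block
-- ===== SOURCE A (Python) =====
-- def find_command_block(lines, start_pattern, end_pattern):
--     """Find the start and end indices of a command block"""
--     start_idx = None
--     end_idx = None
--     brace_count = 0
--     found_start = False
--
--     for i, line in enumerate(lines):
--         if start_pattern in line and not found_start:
--             start_idx = i
--             found_start = True
--             # Count braces on the start line
--             brace_count += line.count('{') - line.count('}')
--             continue
--
--         if found_start:
--             brace_count += line.count('{') - line.count('}')
--             if brace_count == 0 and '}' in line:
--                 end_idx = i + 1  # Include the closing brace line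
--                 break
--
--     return start_idx, end_idx
-- ===== SOURCE B (Python) =====
-- def find_command_block(lines, start_pattern, end_pattern):
--     """Find the start and end indices of a command block"""
--     # Precompute a global prefix-sum table of per-line brace deltas once,
--     # then answer both the start and the end query by pure searches over it:
--     # the end line is the first i > s with prefix[i] == prefix[s-1] and '}' in it.
--     prefix = []
--     total = 0
--     for line in lines:
--         total += line.count('{') - line.count('}')
--         prefix.append(total)
--
--     s = next((i for i, line in enumerate(lines) if start_pattern in line), None)
--     if s is None:
--         return None, None
--     base = prefix[s - 1] if s > 0 else 0
--     e = next((i + 1 for i in range(s + 1, len(lines))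
--               if prefix[i] == base and '}' in lines[i]), None)
--     return s, e
-- ===== Notes on version B (the rewrite author's own statement) =====
-- stated objective: alternative
-- what changed: Replaces A's stateful scan (found_start flag plus a running brace_count restarted at the start line) by a precomputed global prefix-sum table of per-line brace deltas; start and end are then found by two stateless searches over that table, the end being the first i > s with prefix[i] == prefix[s-1] and '}' in the line.
import Mathlib
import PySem

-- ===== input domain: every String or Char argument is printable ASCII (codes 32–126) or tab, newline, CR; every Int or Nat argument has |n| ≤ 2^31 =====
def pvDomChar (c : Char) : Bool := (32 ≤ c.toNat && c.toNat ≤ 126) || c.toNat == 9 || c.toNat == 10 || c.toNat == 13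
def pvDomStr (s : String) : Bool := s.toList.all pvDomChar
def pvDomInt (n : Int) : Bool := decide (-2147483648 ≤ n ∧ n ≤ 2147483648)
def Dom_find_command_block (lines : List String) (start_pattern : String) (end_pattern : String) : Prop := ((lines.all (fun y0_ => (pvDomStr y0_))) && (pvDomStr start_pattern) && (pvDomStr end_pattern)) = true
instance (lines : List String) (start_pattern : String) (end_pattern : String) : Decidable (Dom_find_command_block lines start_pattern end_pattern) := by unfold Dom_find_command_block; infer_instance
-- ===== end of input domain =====

-- B replaces A's stateful scan (found_start flag + running brace_count) by a
-- precomputed prefix-sum table of per-line brace deltas and two stateless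
-- searches over it; same cost, a different data structure.

-- net brace delta of a line: line.count('{') - line.count('}')
def braceDelta (l : String) : Int :=
  (PySem.Str.count l "{" : Int) - (PySem.Str.count l "}" : Int)

-- ===== PORT A =====
-- A's single for-loop over enumerate(lines) with state (start_idx, brace_count, found_start);
-- end_idx is only ever set at the break, so it is returned directly there.
def fcbA_go (sp : String) : List String → Nat → Option Int → Int → Bool → Option Int × Option Int
  | [], _, si, _, _ => (si, none)
  | l :: rest, i, si, bc, fs =>
    if PySem.Str.isIn sp l && !fs then
      fcbA_go sp rest (i + 1) (some (i : Int)) (bc + braceDelta l) true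
    else if fs then
      let bc' := bc + braceDelta l
      if bc' == 0 && PySem.Str.isIn "}" l then (si, some ((i : Int) + 1))
      else fcbA_go sp rest (i + 1) si bc' fs
    else fcbA_go sp rest (i + 1) si bc fs

def find_command_block (lines : List String) (start_pattern : String) (end_pattern : String) : Option Int × Option Int :=
  fcbA_go start_pattern lines 0 none 0 false

-- ===== PORT B =====
-- Source B's first loop: the running prefix-sum table of per-line brace deltas
def fcbB_prefix : List String → Int → List Int
  | [], _ => []
  | l :: rest, t => (t + braceDelta l) :: fcbB_prefix rest (t + braceDelta l)

-- Source B's 'next((i for i, line in enumerate(lines) if sp in line), None)'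
def fcbB_find (sp : String) : List String → Option Nat
  | [] => none
  | l :: rest => if PySem.Str.isIn sp l then some 0 else (fcbB_find sp rest).map (· + 1)

-- Source B's 'next((i+1 for i in range(s+1, len(lines)) if prefix[i] == base and '}' in lines[i]), None)':
-- iterating i over the tail is reading the (prefix, line) pairs from position s+1 on
def fcbB_search (base : Int) : List (Int × String) → Nat → Option Int
  | [], _ => none
  | (p, l) :: rest, i =>
    if p == base && PySem.Str.isIn "}" l then some ((i : Int) + 1)
    else fcbB_search base rest (i + 1)

def find_command_block_alt (lines : List String) (start_pattern : String) (end_pattern : String) : Option Int × Option Int :=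
  let pfx := fcbB_prefix lines 0
  match fcbB_find start_pattern lines with
  | none => (none, none)
  | some s =>
    let base := if s > 0 then pfx.getD (s - 1) 0 else 0
    (some (s : Int), fcbB_search base ((pfx.zip lines).drop (s + 1)) (s + 1))

-- ===== PRECONDITION & SPEC =====
def Spec_find_command_block (lines : List String) (start_pattern : String) (end_pattern : String) (out : Option Int × Option Int) : Prop := out = find_command_block_alt lines start_pattern end_pattern
instance (lines : List String) (start_pattern : String) (end_pattern : String) (out : Option Int × Option Int) : Decidable (Spec_find_command_block lines start_pattern end_pattern out) := by unfold Spec_find_command_block; infer_instance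

-- ===== CLAIM =====
def Claim_equal_find_command_block : Prop := ∀ (lines : List String) (start_pattern : String) (end_pattern : String), Dom_find_command_block lines start_pattern end_pattern → Spec_find_command_block lines start_pattern end_pattern (find_command_block lines start_pattern end_pattern)

-- ===== LEMMAS AND PROOFS =====

-- dropping distributes over zip
theorem pv_zip_drop : ∀ (n : Nat) (xs : List Int) (ys : List String),
    (xs.zip ys).drop n = (xs.drop n).zip (ys.drop n) := by
  intro n
  induction n with
  | zero => intro xs ys; rfl
  | succ m ih =>
    intro xs ys
    cases xs with
    | nil => simp
    | cons x xt =>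
      cases ys with
      | nil => simp
      | cons y yt => simpa using ih xt yt

-- A's loop after found_start: the plain balance scan
def fcbA_end : List String → Nat → Int → Option Int
  | [], _, _ => none
  | l :: rest, i, bc =>
    let bc' := bc + braceDelta l
    if bc' == 0 && PySem.Str.isIn "}" l then some ((i : Int) + 1)
    else fcbA_end rest (i + 1) bc'

theorem fcbA_go_found (sp : String) : ∀ (ls : List String) (i : Nat) (si : Int) (bc : Int),
    fcbA_go sp ls i (some si) bc true = (some si, fcbA_end ls i bc) := by
  intro ls
  induction ls with
  | nil => intro i si bc; rfl
  | cons l rest ih =>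
    intro i si bc
    simp only [fcbA_go, fcbA_end, Bool.not_true, Bool.and_false, Bool.false_eq_true,
      if_false, if_true]
    split
    · rfl
    · exact ih (i + 1) si (bc + braceDelta l)

theorem fcbB_find_lt (sp : String) : ∀ (ls : List String) (j : Nat),
    fcbB_find sp ls = some j → j < ls.length := by
  intro ls
  induction ls with
  | nil => intro j h; simp [fcbB_find] at h
  | cons l rest ih =>
    intro j h
    simp only [fcbB_find] at h
    split at h
    · cases h; simp
    · obtain ⟨j', hj', rfl⟩ := Option.map_eq_some_iff.mp h
      have := ih j' hj'
      simp; omega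

-- A = (start index, balance scan from the next line) in terms of B's first search
theorem fcbA_go_main (sp : String) : ∀ (ls : List String) (i : Nat),
    fcbA_go sp ls i none 0 false =
      match fcbB_find sp ls with
      | none => (none, none)
      | some j => (some ((i + j : Nat) : Int),
          fcbA_end (ls.drop (j + 1)) (i + j + 1) (braceDelta (ls.getD j ""))) := by
  intro ls
  induction ls with
  | nil => intro i; rfl
  | cons l rest ih =>
    intro i
    by_cases hl : PySem.Str.isIn sp l = true
    · simp only [fcbA_go, fcbB_find, hl, Bool.not_false, Bool.and_true, if_true]
      rw [fcbA_go_found]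
      simp
    · simp only [fcbA_go, fcbB_find, hl, Bool.false_and, Bool.false_eq_true, if_false]
      rw [ih (i + 1)]
      cases hf : fcbB_find sp rest with
      | none => simp
      | some j' =>
        simp only [Option.map_some]
        have h1 : (l :: rest).drop (j' + 1 + 1) = rest.drop (j' + 1) := rfl
        have h2 : (l :: rest).getD (j' + 1) "" = rest.getD j' "" := rfl
        rw [h1, h2]
        congr 2 <;> omega

-- the balance scan = B's prefix-table search, for any base point
theorem fcbA_end_eq_search : ∀ (ls : List String) (i : Nat) (b t : Int),
    fcbA_end ls i (t - b) = fcbB_search b ((fcbB_prefix ls t).zip ls) i := by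
  intro ls
  induction ls with
  | nil => intro i b t; rfl
  | cons l rest ih =>
    intro i b t
    simp only [fcbA_end, fcbB_prefix, List.zip_cons_cons, fcbB_search]
    have hcond : ((t - b + braceDelta l) == 0) = ((t + braceDelta l) == b) := by
      by_cases h : t + braceDelta l = b
      · simp [h, show t - b + braceDelta l = 0 by omega]
      · simp [h, show ¬ (t - b + braceDelta l = 0) by omega]
    rw [hcond]
    split
    · rfl
    · have : t - b + braceDelta l = (t + braceDelta l) - b := by omega
      rw [this, ih]

-- dropping from the prefix table restarts it at the partial sum
theorem fcbB_prefix_drop : ∀ (ls : List String) (t : Int) (n : Nat), n < ls.length →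
    (fcbB_prefix ls t).drop (n + 1) =
      fcbB_prefix (ls.drop (n + 1)) ((fcbB_prefix ls t).getD n 0) := by
  intro ls
  induction ls with
  | nil => intro t n h; simp at h
  | cons l rest ih =>
    intro t n h
    cases n with
    | zero => simp [fcbB_prefix]
    | succ m =>
      have hm : m < rest.length := by simpa using h
      have h1 : (fcbB_prefix (l :: rest) t).drop (m + 1 + 1)
          = (fcbB_prefix rest (t + braceDelta l)).drop (m + 1) := rfl
      have h2 : (fcbB_prefix (l :: rest) t).getD (m + 1) 0
          = (fcbB_prefix rest (t + braceDelta l)).getD m 0 := rfl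
      rw [h1, h2, ih _ m hm]
      rfl

-- entry n of the table = entry (n-1) + delta of line n
theorem fcbB_prefix_getD_succ : ∀ (ls : List String) (t : Int) (n : Nat), n < ls.length →
    (fcbB_prefix ls t).getD n 0 =
      (if n > 0 then (fcbB_prefix ls t).getD (n - 1) 0 else t) + braceDelta (ls.getD n "") := by
  intro ls
  induction ls with
  | nil => intro t n h; simp at h
  | cons l rest ih =>
    intro t n h
    cases n with
    | zero => simp [fcbB_prefix]
    | succ m =>
      have hm : m < rest.length := by simpa using h
      have h1 : (fcbB_prefix (l :: rest) t).getD (m + 1) 0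
          = (fcbB_prefix rest (t + braceDelta l)).getD m 0 := rfl
      have h3 : (l :: rest).getD (m + 1) "" = rest.getD m "" := rfl
      rw [h1, h3, ih _ m hm]
      cases m with
      | zero => simp [fcbB_prefix]
      | succ k =>
        have h4 : (fcbB_prefix (l :: rest) t).getD (k + 1 + 1 - 1) 0
            = (fcbB_prefix rest (t + braceDelta l)).getD (k + 1 - 1) 0 := rfl
        simp only [show k + 1 + 1 > 0 from Nat.succ_pos _, show k + 1 > 0 from Nat.succ_pos _,
          if_true, h4]

-- ===== VERDICT =====
theorem find_command_block_spec : Claim_equal_find_command_block := by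
  intro lines sp ep _
  unfold Spec_find_command_block find_command_block find_command_block_alt
  rw [fcbA_go_main]
  cases hf : fcbB_find sp lines with
  | none => rfl
  | some s =>
    have hlt := fcbB_find_lt sp lines s hf
    simp only [Nat.zero_add]
    have hzip : ((fcbB_prefix lines 0).zip lines).drop (s + 1)
        = ((fcbB_prefix lines 0).drop (s + 1)).zip (lines.drop (s + 1)) := by
      exact pv_zip_drop (s + 1) _ _
    rw [hzip, fcbB_prefix_drop lines 0 s hlt]
    have hstep := fcbB_prefix_getD_succ lines 0 s hlt
    set b : Int := if s > 0 then (fcbB_prefix lines 0).getD (s - 1) 0 else 0 with hb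
    have ht : (fcbB_prefix lines 0).getD s 0 = b + braceDelta (lines.getD s "") := by
      rw [hstep, hb]
    rw [ht]
    have key := fcbA_end_eq_search (lines.drop (s + 1)) (s + 1) b
      (b + braceDelta (lines.getD s ""))
    rw [show b + braceDelta (lines.getD s "") - b = braceDelta (lines.getD s "") from by
      omega] at key
    rw [key]
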